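-- pv_equiv track=rewrite | github.com/AIVIETNAM-Hub/STER-VLM-Spatio-Temporal-With-Enhanced-Reference-Vision-Language-Models | src_cleaned/utils/choose_prompt.py | get_prompt_merge
-- ===== SOURCE A (Python) =====
-- def get_prompt_merge(image_len, fixed_caption, phase_caption, phase_number, type):
--     prompt = ""
--     if image_len > 0:
--         for _ in range(image_len):
--             prompt += "<image>\n"
--
--     if phase_number == "0":
--         prompt += f"""You are a expert in analyzing fine-grained video understanding in traffic scenarios.
--
-- CONTEXT: You are given some visual related images and initial captions. The images will related to spatial characteristics , like the characteristic of the pedestrian(gender, age, height, clothes, his surrounding, etc.), the condition of the environment(Weather, lighting condition, road surface, type of road, sidewalk, traffic volume, road inclination, etc), and the phase of the **RECOGNITION** phase, where the timing is from the start of the environment awareness(crosswalks, traffic signals, vehicles, etc), until a judgement is made. There should be some awareness clues of the pedestrian in front of the point of the vehicle's view.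
--
-- Here are the initial captions:
-- SPATIAL caption: {fixed_caption}
-- PRERECOGNITION caption: {phase_caption}
--
-- GOAL: Your objective is to generate a response for the [{type.upper()} CAPTION], using the clues from the images and the initial captions. You caption should be around 4-6 sentences."""
--     elif phase_number == "1":
--         prompt += f"""You are a expert in analyzing fine-grained video understanding in traffic scenarios.
--
-- CONTEXT: You are given some visual related images and initial captions. The images will related to spatial characteristics , like the characteristic of the pedestrian(gender, age, height, clothes, his surrounding, etc.), the condition of the environment(Weather, lighting condition, road surface, type of road, sidewalk, traffic volume, road inclination, etc), and the phase of the **RECOGNITION** phase, where the timing is from the start of the environment awareness(crosswalks, traffic signals, vehicles, etc), until a judgement is made. There should be some awareness clues of the pedestrian in front of the point of the vehicle's view.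
--
-- Here are the initial captions:
-- SPATIAL caption: {fixed_caption}
-- RECOGNITION caption: {phase_caption}
--
-- GOAL: Your objective is to generate a response for the [{type.upper()} CAPTION], using the clues from the images and the initial captions. You caption should be around 4-6 sentences."""
--         pass
--     elif phase_number == "2":
--         prompt += f"""You are a expert in analyzing fine-grained video understanding in traffic scenarios.
--
-- CONTEXT: You are given some visual related images and initial captions. The images will related to spatial characteristics , like the characteristic of the pedestrian(gender, age, height, clothes, his surrounding, etc.), the condition of the environment(Weather, lighting condition, road surface, type of road, sidewalk, traffic volume, road inclination, etc), and the phase of the  **JUDGEMENT** phase. In principle, it is the moment from which environmental awareness is completed until the start of an action. The pedestrian should be fully awareness of the surrounding situation.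
--
-- Here are the initial captions:
-- SPATIAL caption: {fixed_caption}
-- JUDGEMENT caption: {phase_caption}
--
-- GOAL: Your objective is to generate a response for the [{type.upper()} CAPTION], using the clues from the images and the initial captions. You caption should be around 4-6 sentences."""
--     elif phase_number == "3":
--         prompt += f"""You are a expert in analyzing fine-grained video understanding in traffic scenarios.
--
-- CONTEXT: You are given some visual related images and initial captions. The images will related to spatial characteristics , like the characteristic of the pedestrian(gender, age, height, clothes, his surrounding, etc.), the condition of the environment(Weather, lighting condition, road surface, type of road, sidewalk, traffic volume, road inclination, etc), and the phase of the  **ACTION** phase. In principle, this is the start moment of any part of the body of the pedestrian(eye and ears) up to the time a result(e.g, collision) occurs. The action should be clear to recognize in front of the vehicle view.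
--
-- Here are the initial captions:
-- SPATIAL caption: {fixed_caption}
-- ACTION caption: {phase_caption}
--
-- GOAL: Your objective is to generate a response for the [{type.upper()} CAPTION], using the clues from the images and the initial captions. You caption should be around 4-6 sentences."""
--     else:
--         prompt += f"""You are a expert in analyzing fine-grained video understanding in traffic scenarios.
--
-- CONTEXT: You are given some visual related images and initial captions. The images will related to spatial characteristics , like the characteristic of the pedestrian(gender, age, height, clothes, his surrounding, etc.), the condition of the environment(Weather, lighting condition, road surface, type of road, sidewalk, traffic volume, road inclination, etc), and the phase of the  **AVOIDANCE** phase. In principle, this is the time after avoidability is clear until the time of avoidance happened or failure to avoid of the pedestrian.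
--
-- Here are the initial captions:
-- SPATIAL caption: {fixed_caption}
-- AVOIDANCE caption: {phase_caption}
--
-- GOAL: Your objective is to generate a response for the [{type.upper()} CAPTION], using the clues from the images and the initial captions. You caption should be around 4-6 sentences."""
--     return prompt
-- ===== SOURCE B (Python) =====
-- # B: fill-in-the-blanks renderer: one literal piece list interleaved with a slot list,
-- # phase selected by index into parallel arrays; output assembled by list-append + join.
--
-- HEAD = """You are a expert in analyzing fine-grained video understanding in traffic scenarios.
--
-- CONTEXT: You are given some visual related images and initial captions. The images will related to spatial characteristics , like the characteristic of the pedestrian(gender, age, height, clothes, his surrounding, etc.), the condition of the environment(Weather, lighting condition, road surface, type of road, sidewalk, traffic volume, road inclination, etc), and the phase of the """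
--
-- S1 = "\n\nHere are the initial captions:\nSPATIAL caption: "
-- S4 = "\n\nGOAL: Your objective is to generate a response for the ["
-- TAIL = " CAPTION], using the clues from the images and the initial captions. You caption should be around 4-6 sentences."
--
-- PIECES = ["", HEAD, S1, "\n", " caption: ", S4, TAIL]
--
-- DESCS = [
--     "**RECOGNITION** phase, where the timing is from the start of the environment awareness(crosswalks, traffic signals, vehicles, etc), until a judgement is made. There should be some awareness clues of the pedestrian in front of the point of the vehicle's view.",
--     "**RECOGNITION** phase, where the timing is from the start of the environment awareness(crosswalks, traffic signals, vehicles, etc), until a judgement is made. There should be some awareness clues of the pedestrian in front of the point of the vehicle's view.",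
--     " **JUDGEMENT** phase. In principle, it is the moment from which environmental awareness is completed until the start of an action. The pedestrian should be fully awareness of the surrounding situation.",
--     " **ACTION** phase. In principle, this is the start moment of any part of the body of the pedestrian(eye and ears) up to the time a result(e.g, collision) occurs. The action should be clear to recognize in front of the vehicle view.",
--     " **AVOIDANCE** phase. In principle, this is the time after avoidability is clear until the time of avoidance happened or failure to avoid of the pedestrian.",
-- ]
-- LABELS = ["PRERECOGNITION", "RECOGNITION", "JUDGEMENT", "ACTION", "AVOIDANCE"]
--
-- def get_prompt_merge(image_len, fixed_caption, phase_caption, phase_number, type):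
--     try:
--         i = ["0", "1", "2", "3"].index(phase_number)
--     except ValueError:
--         i = 4
--     vals = ["<image>\n" * image_len, DESCS[i], fixed_caption,
--             LABELS[i], phase_caption, type.upper()]
--     out = []
--     for piece, val in zip(PIECES, vals + [""]):
--         out.append(piece)
--         out.append(val)
--     return "".join(out)
-- ===== Notes on version B (the rewrite author's own statement) =====
-- stated objective: simpler
-- what changed: Replaces A's image loop and five near-duplicate f-string branches by a fill-in-the-blanks renderer: a phase index into parallel description/label arrays and one pass that interleaves a fixed literal-piece list with a slot-value list and joins them.
import Mathlib
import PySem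

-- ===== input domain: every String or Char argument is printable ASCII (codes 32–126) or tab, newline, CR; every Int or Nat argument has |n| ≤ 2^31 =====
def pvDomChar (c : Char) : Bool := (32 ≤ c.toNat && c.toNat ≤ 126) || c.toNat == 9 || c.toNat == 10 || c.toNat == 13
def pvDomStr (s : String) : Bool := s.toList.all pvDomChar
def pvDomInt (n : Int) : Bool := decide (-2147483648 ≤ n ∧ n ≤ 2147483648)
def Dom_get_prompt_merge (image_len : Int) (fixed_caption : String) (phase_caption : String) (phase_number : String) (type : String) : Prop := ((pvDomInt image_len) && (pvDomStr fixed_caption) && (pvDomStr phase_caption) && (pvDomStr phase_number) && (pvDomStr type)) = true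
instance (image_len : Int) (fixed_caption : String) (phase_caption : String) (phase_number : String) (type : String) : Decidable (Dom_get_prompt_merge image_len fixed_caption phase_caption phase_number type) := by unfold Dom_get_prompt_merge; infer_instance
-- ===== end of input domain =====

-- B replaces A's image loop and five near-duplicate f-string branches by a fill-in-the-blanks
-- renderer (phase index into parallel arrays, literal pieces interleaved with slot values and
-- joined); objective: simpler. Same return value on every input.

-- ===== PORT A =====
-- the literal string pieces of A's five f-strings (pre = up to {fixed_caption}, mid = up to
-- {phase_caption}, mid2 = up to {type.upper()}, tail = the rest; mid2/tail are shared verbatim)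
def pvA0pre : String := "You are a expert in analyzing fine-grained video understanding in traffic scenarios. \n\nCONTEXT: You are given some visual related images and initial captions. The images will related to spatial characteristics , like the characteristic of the pedestrian(gender, age, height, clothes, his surrounding, etc.), the condition of the environment(Weather, lighting condition, road surface, type of road, sidewalk, traffic volume, road inclination, etc), and the phase of the **RECOGNITION** phase, where the timing is from the start of the environment awareness(crosswalks, traffic signals, vehicles, etc), until a judgement is made. There should be some awareness clues of the pedestrian in front of the point of the vehicle's view.\n\nHere are the initial captions:\nSPATIAL caption: "
def pvA0mid : String := "\nPRERECOGNITION caption: "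
def pvA1pre : String := "You are a expert in analyzing fine-grained video understanding in traffic scenarios. \n\nCONTEXT: You are given some visual related images and initial captions. The images will related to spatial characteristics , like the characteristic of the pedestrian(gender, age, height, clothes, his surrounding, etc.), the condition of the environment(Weather, lighting condition, road surface, type of road, sidewalk, traffic volume, road inclination, etc), and the phase of the **RECOGNITION** phase, where the timing is from the start of the environment awareness(crosswalks, traffic signals, vehicles, etc), until a judgement is made. There should be some awareness clues of the pedestrian in front of the point of the vehicle's view.\n\nHere are the initial captions:\nSPATIAL caption: "
def pvA1mid : String := "\nRECOGNITION caption: "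
def pvA2pre : String := "You are a expert in analyzing fine-grained video understanding in traffic scenarios. \n\nCONTEXT: You are given some visual related images and initial captions. The images will related to spatial characteristics , like the characteristic of the pedestrian(gender, age, height, clothes, his surrounding, etc.), the condition of the environment(Weather, lighting condition, road surface, type of road, sidewalk, traffic volume, road inclination, etc), and the phase of the  **JUDGEMENT** phase. In principle, it is the moment from which environmental awareness is completed until the start of an action. The pedestrian should be fully awareness of the surrounding situation.\n\nHere are the initial captions:\nSPATIAL caption: "
def pvA2mid : String := "\nJUDGEMENT caption: "
def pvA3pre : String := "You are a expert in analyzing fine-grained video understanding in traffic scenarios. \n\nCONTEXT: You are given some visual related images and initial captions. The images will related to spatial characteristics , like the characteristic of the pedestrian(gender, age, height, clothes, his surrounding, etc.), the condition of the environment(Weather, lighting condition, road surface, type of road, sidewalk, traffic volume, road inclination, etc), and the phase of the  **ACTION** phase. In principle, this is the start moment of any part of the body of the pedestrian(eye and ears) up to the time a result(e.g, collision) occurs. The action should be clear to recognize in front of the vehicle view.\n\nHere are the initial captions:\nSPATIAL caption: "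
def pvA3mid : String := "\nACTION caption: "
def pvA4pre : String := "You are a expert in analyzing fine-grained video understanding in traffic scenarios. \n\nCONTEXT: You are given some visual related images and initial captions. The images will related to spatial characteristics , like the characteristic of the pedestrian(gender, age, height, clothes, his surrounding, etc.), the condition of the environment(Weather, lighting condition, road surface, type of road, sidewalk, traffic volume, road inclination, etc), and the phase of the  **AVOIDANCE** phase. In principle, this is the time after avoidability is clear until the time of avoidance happened or failure to avoid of the pedestrian.\n\nHere are the initial captions:\nSPATIAL caption: "
def pvA4mid : String := "\nAVOIDANCE caption: "
def pvAmid2 : String := "\n\nGOAL: Your objective is to generate a response for the ["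
def pvAtail : String := " CAPTION], using the clues from the images and the initial captions. You caption should be around 4-6 sentences."

def get_prompt_merge (image_len : Int) (fixed_caption : String) (phase_caption : String) (phase_number : String) (type : String) : String :=
  let prompt : String := ""
  let prompt : String :=
    if image_len > 0 then
      (PySem.List.pyRange 0 image_len 1).foldl (fun p _ => p ++ "<image>\n") prompt
    else prompt
  if phase_number == "0" then
    prompt ++ (pvA0pre ++ fixed_caption ++ pvA0mid ++ phase_caption ++ pvAmid2 ++ PySem.Str.upper type ++ pvAtail)
  else if phase_number == "1" then
    prompt ++ (pvA1pre ++ fixed_caption ++ pvA1mid ++ phase_caption ++ pvAmid2 ++ PySem.Str.upper type ++ pvAtail)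
  else if phase_number == "2" then
    prompt ++ (pvA2pre ++ fixed_caption ++ pvA2mid ++ phase_caption ++ pvAmid2 ++ PySem.Str.upper type ++ pvAtail)
  else if phase_number == "3" then
    prompt ++ (pvA3pre ++ fixed_caption ++ pvA3mid ++ phase_caption ++ pvAmid2 ++ PySem.Str.upper type ++ pvAtail)
  else
    prompt ++ (pvA4pre ++ fixed_caption ++ pvA4mid ++ phase_caption ++ pvAmid2 ++ PySem.Str.upper type ++ pvAtail)

-- ===== PORT B =====
-- module constants of Source B
def pvHead : String := "You are a expert in analyzing fine-grained video understanding in traffic scenarios. \n\nCONTEXT: You are given some visual related images and initial captions. The images will related to spatial characteristics , like the characteristic of the pedestrian(gender, age, height, clothes, his surrounding, etc.), the condition of the environment(Weather, lighting condition, road surface, type of road, sidewalk, traffic volume, road inclination, etc), and the phase of the "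
def pvS1 : String := "\n\nHere are the initial captions:\nSPATIAL caption: "
def pvS4 : String := "\n\nGOAL: Your objective is to generate a response for the ["
def pvTail : String := " CAPTION], using the clues from the images and the initial captions. You caption should be around 4-6 sentences."
def pvPieces : List String := ["", pvHead, pvS1, "\n", " caption: ", pvS4, pvTail]
def pvDesc0 : String := "**RECOGNITION** phase, where the timing is from the start of the environment awareness(crosswalks, traffic signals, vehicles, etc), until a judgement is made. There should be some awareness clues of the pedestrian in front of the point of the vehicle's view."
def pvDesc2 : String := " **JUDGEMENT** phase. In principle, it is the moment from which environmental awareness is completed until the start of an action. The pedestrian should be fully awareness of the surrounding situation."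
def pvDesc3 : String := " **ACTION** phase. In principle, this is the start moment of any part of the body of the pedestrian(eye and ears) up to the time a result(e.g, collision) occurs. The action should be clear to recognize in front of the vehicle view."
def pvDesc4 : String := " **AVOIDANCE** phase. In principle, this is the time after avoidability is clear until the time of avoidance happened or failure to avoid of the pedestrian."
def pvDescs : List String := [pvDesc0, pvDesc0, pvDesc2, pvDesc3, pvDesc4]
def pvLabels : List String := ["PRERECOGNITION", "RECOGNITION", "JUDGEMENT", "ACTION", "AVOIDANCE"]

def get_prompt_merge_alt (image_len : Int) (fixed_caption : String) (phase_caption : String) (phase_number : String) (type : String) : String :=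
  -- try/except list.index → index? with default 4
  let i : Nat := (PySem.List.index? ["0", "1", "2", "3"] phase_number).getD 4
  let vals : List String := [String.join (List.replicate image_len.toNat "<image>\n"),
    pvDescs.getD i "", fixed_caption, pvLabels.getD i "", phase_caption, PySem.Str.upper type]
  let out : List String :=
    (pvPieces.zip (vals ++ [""])).foldl (fun acc pv => acc ++ [pv.1, pv.2]) []
  String.join out

-- ===== PRECONDITION & SPEC =====
def Spec_get_prompt_merge (image_len : Int) (fixed_caption : String) (phase_caption : String) (phase_number : String) (type : String) (out : String) : Prop := out = get_prompt_merge_alt image_len fixed_caption phase_caption phase_number type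
instance (image_len : Int) (fixed_caption : String) (phase_caption : String) (phase_number : String) (type : String) (out : String) : Decidable (Spec_get_prompt_merge image_len fixed_caption phase_caption phase_number type out) := by unfold Spec_get_prompt_merge; infer_instance

-- ===== CLAIM =====
def Claim_equal_get_prompt_merge : Prop := ∀ (image_len : Int) (fixed_caption : String) (phase_caption : String) (phase_number : String) (type : String), Dom_get_prompt_merge image_len fixed_caption phase_caption phase_number type → Spec_get_prompt_merge image_len fixed_caption phase_caption phase_number type (get_prompt_merge image_len fixed_caption phase_caption phase_number type)

-- ===== LEMMAS AND PROOFS =====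

-- pulling the accumulator out of a string-concat foldl
theorem pv_join_pull (l : List String) (a : String) :
    List.foldl (fun r s => r ++ s) a l = a ++ List.foldl (fun r s => r ++ s) "" l := by
  induction l generalizing a with
  | nil => simp
  | cons x xs ih =>
      simp only [List.foldl_cons]
      rw [ih (a ++ x), ih ("" ++ x)]
      simp [String.append_assoc]

-- appending a constant string once per list element = appending its |l|-fold join
theorem pv_foldl_append (s : String) (l : List Int) (acc : String) :
    l.foldl (fun p _ => p ++ s) acc = acc ++ String.join (List.replicate l.length s) := by
  induction l generalizing acc with
  | nil => simp [String.join]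
  | cons x xs ih =>
      rw [List.foldl_cons, ih]
      simp only [List.length_cons, List.replicate_succ, String.join, List.foldl_cons]
      rw [pv_join_pull (List.replicate xs.length s) ("" ++ s)]
      simp [String.append_assoc]

-- A's image-prefix loop equals B's replicate-join
theorem pv_prefix_eq (n : Int) :
    (if n > 0 then (PySem.List.pyRange 0 n 1).foldl (fun p _ => p ++ "<image>\n") "" else "") =
    String.join (List.replicate n.toNat "<image>\n") := by
  split
  · rw [pv_foldl_append]
    simp [PySem.List.length_pyRange_one]
  · have : n.toNat = 0 := by omega
    simp [this, String.join]

-- A's mid2/tail literals coincide with B's S4/TAIL constants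
theorem pv_m2 : pvAmid2 = pvS4 := by decide
theorem pv_tl : pvAtail = pvTail := by decide

-- ===== VERDICT =====
set_option maxRecDepth 40000 in
set_option maxHeartbeats 2000000 in
theorem get_prompt_merge_spec : Claim_equal_get_prompt_merge := by
  intro image_len fixed_caption phase_caption phase_number type _
  unfold Spec_get_prompt_merge get_prompt_merge get_prompt_merge_alt
  simp only []
  rw [pv_prefix_eq]
  by_cases h0 : phase_number = "0"
  · subst h0
    have hi : (PySem.List.index? ["0", "1", "2", "3"] "0").getD 4 = 0 := by decide
    rw [hi]
    have hpre : pvA0pre = pvHead ++ (pvDesc0 ++ pvS1) := by decide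
    have hmid : pvA0mid = "\n" ++ ("PRERECOGNITION" ++ " caption: ") := by decide
    simp [pvPieces, pvDescs, pvLabels, List.zip, List.zipWith, String.join, hpre, hmid, pv_m2, pv_tl,
      String.append_assoc]
  · by_cases h1 : phase_number = "1"
    · subst h1
      have hi : (PySem.List.index? ["0", "1", "2", "3"] "1").getD 4 = 1 := by decide
      rw [hi]
      have hpre : pvA1pre = pvHead ++ (pvDesc0 ++ pvS1) := by decide
      have hmid : pvA1mid = "\n" ++ ("RECOGNITION" ++ " caption: ") := by decide
      simp [pvPieces, pvDescs, pvLabels, List.zip, List.zipWith, String.join, hpre, hmid, pv_m2, pv_tl,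
        String.append_assoc]
    · by_cases h2 : phase_number = "2"
      · subst h2
        have hi : (PySem.List.index? ["0", "1", "2", "3"] "2").getD 4 = 2 := by decide
        rw [hi]
        have hpre : pvA2pre = pvHead ++ (pvDesc2 ++ pvS1) := by decide
        have hmid : pvA2mid = "\n" ++ ("JUDGEMENT" ++ " caption: ") := by decide
        simp [pvPieces, pvDescs, pvLabels, List.zip, List.zipWith, String.join, hpre, hmid, pv_m2, pv_tl,
          String.append_assoc]
      · by_cases h3 : phase_number = "3"
        · subst h3
          have hi : (PySem.List.index? ["0", "1", "2", "3"] "3").getD 4 = 3 := by decide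
          rw [hi]
          have hpre : pvA3pre = pvHead ++ (pvDesc3 ++ pvS1) := by decide
          have hmid : pvA3mid = "\n" ++ ("ACTION" ++ " caption: ") := by decide
          simp [pvPieces, pvDescs, pvLabels, List.zip, List.zipWith, String.join,
            hpre, hmid, pv_m2, pv_tl, String.append_assoc]
        · have hnone : PySem.List.index? ["0", "1", "2", "3"] phase_number = none := by
            rw [PySem.List.index?_eq_none_iff]
            simp [h0, h1, h2, h3]
          rw [hnone]
          have hpre : pvA4pre = pvHead ++ (pvDesc4 ++ pvS1) := by decide
          have hmid : pvA4mid = "\n" ++ ("AVOIDANCE" ++ " caption: ") := by decide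
          simp [h0, h1, h2, h3, pvPieces, pvDescs, pvLabels, List.zip, List.zipWith, String.join,
            hpre, hmid, pv_m2, pv_tl, String.append_assoc]
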